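-- pv_equiv track=rewrite | github.com/Akuearias/LeetCode | lexicographicallySmallestString.py | lexicographicallySmallestString
-- ===== SOURCE A (Python) =====
-- from functools import cache
--
-- def adjacent(x, y):
--     return abs(ord(x) - ord(y)) == 1 or abs(ord(x) - ord(y)) == 25
--
-- def lexicographicallySmallestString(s: str) -> str:
--     n = len(s)
--
--     @cache
--     def empty(i, j):
--         if i > j:
--             return True
--
--         if adjacent(s[i], s[j]) and empty(i + 1, j - 1):
--             return True
--
--         for k in range(i + 1, j - 1, 2):
--             if empty(i, k) and empty(k + 1, j):
--                 return True
--         return False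
--
--     @cache
--     def DFS(i):
--         if i == n:
--             return ""
--
--         dummy = s[i] + DFS(i + 1)
--         for j in range(i + 1, n, 2):
--             if empty(i, j):
--                 dummy = min(dummy, DFS(j + 1))
--
--         return dummy
--
--     return DFS(0)
-- ===== SOURCE B (Python) =====
-- def adjacent(x, y):
--     return abs(ord(x) - ord(y)) == 1 or abs(ord(x) - ord(y)) == 25
--
-- def lexicographicallySmallestString(s: str) -> str:
--     # Bottom-up tabulation instead of two memoized recursions.
--     n = len(s)
--     # E[i][j] == True  iff  s[i..j] can be fully removed (same recurrence, filled
--     # with i descending and j ascending so every cell read is already filled).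
--     E = [[False] * n for _ in range(n)]
--     for i in range(n - 1, -1, -1):
--         for j in range(i, n):
--             E[i][j] = (adjacent(s[i], s[j]) and (j == i + 1 or E[i + 1][j - 1])) \
--                 or any(E[i][k] and E[k + 1][j] for k in range(i + 1, j - 1, 2))
--     # best[i] = smallest string obtainable from the suffix s[i:]
--     best = [""] * (n + 1)
--     for i in range(n - 1, -1, -1):
--         cur = s[i] + best[i + 1]
--         for j in range(i + 1, n, 2):
--             if E[i][j]:
--                 cand = best[j + 1]
--                 if cand < cur:
--                     cur = cand
--         best[i] = cur
--     return best[0]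
-- ===== Notes on version B (the rewrite author's own statement) =====
-- stated objective: alternative
-- what changed: Replaces the two memoized top-down recursions (empty(i,j) and DFS(i)) by bottom-up dynamic-programming tables: a 2D removability table filled with i descending and j ascending, then a 1D best-suffix table filled from n down to 0.
import Mathlib
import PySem

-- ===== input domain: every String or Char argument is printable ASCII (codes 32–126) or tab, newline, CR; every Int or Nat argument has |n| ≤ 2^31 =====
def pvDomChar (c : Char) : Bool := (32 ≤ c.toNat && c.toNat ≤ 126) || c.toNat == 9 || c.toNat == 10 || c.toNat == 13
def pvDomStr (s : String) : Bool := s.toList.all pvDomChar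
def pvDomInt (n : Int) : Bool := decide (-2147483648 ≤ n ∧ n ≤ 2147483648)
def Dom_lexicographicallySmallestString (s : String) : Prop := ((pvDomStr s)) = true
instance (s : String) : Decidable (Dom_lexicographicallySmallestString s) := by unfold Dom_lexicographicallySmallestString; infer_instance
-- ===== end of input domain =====

-- B replaces the two memoized top-down recursions of A by bottom-up tables (a 2D
-- removability table, then a 1D best-suffix table); objective: alternative decomposition.

-- ===== PORT A =====
-- module helper adjacent(x, y)
def adjacentCh (x y : Char) : Bool :=
  ((x.toNat : Int) - (y.toNat : Int)).natAbs == 1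
    || ((x.toNat : Int) - (y.toNat : Int)).natAbs == 25

-- range(a, b, 2) over ℕ (every index in both programs is ≥ 0; for b ≤ a it is empty,
-- exactly like Python's range, so the ℕ truncation j-1 is exact here)
def rangeStep2 (a b : Nat) : List Nat :=
  (List.range ((b - a + 1) / 2)).map (fun t => a + 2 * t)

-- bounds of the members, used by the termination arguments of the ports
theorem mem_rangeStep2 {a b k : Nat} (h : k ∈ rangeStep2 a b) : a ≤ k ∧ k < b := by
  simp only [rangeStep2, List.mem_map, List.mem_range] at h
  obtain ⟨t, ht, rfl⟩ := h
  omega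

-- empty(i, j): the early-return chain is written as the equivalent disjunction
def emptyA (cs : List Char) (i j : Nat) : Bool :=
  if h : i > j then true
  else
    (adjacentCh (cs.getD i ' ') (cs.getD j ' ') && emptyA cs (i + 1) (j - 1))
      || (rangeStep2 (i + 1) (j - 1)).attach.any
            (fun k => emptyA cs i k.1 && emptyA cs (k.1 + 1) j)
termination_by j + 1 - i
decreasing_by
  · omega
  · have := mem_rangeStep2 k.2; omega
  · have := mem_rangeStep2 k.2; omega

-- DFS(i); DFS is only ever reached with i ≤ n, where the test i == n is the same as
-- i ≥ n, written so to make termination evident; min(dummy, x) is the inner if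
def dfsA (cs : List Char) (n i : Nat) : String :=
  if h : i ≥ n then ""
  else
    (rangeStep2 (i + 1) n).attach.foldl
      (fun dummy j =>
        if emptyA cs i j.1 then
          (if dummy ≤ dfsA cs n (j.1 + 1) then dummy else dfsA cs n (j.1 + 1))
        else dummy)
      (String.ofList (cs.getD i ' ' :: (dfsA cs n (i + 1)).toList))
termination_by n - i
decreasing_by
  · have := mem_rangeStep2 j.2; omega
  · omega

def lexicographicallySmallestString (s : String) : String :=
  dfsA s.toList s.toList.length 0

-- ===== PORT B =====
-- Source B's 2D list E is a List (List Bool); reading E[a][b] (always in range in Source B)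
def getE (E : List (List Bool)) (a b : Nat) : Bool := (E.getD a []).getD b false

-- the right-hand side assigned to E[i][j] in Source B
def cellB (cs : List Char) (E : List (List Bool)) (i j : Nat) : Bool :=
  (adjacentCh (cs.getD i ' ') (cs.getD j ' ') && (decide (j = i + 1) || getE E (i + 1) (j - 1)))
    || (rangeStep2 (i + 1) (j - 1)).any (fun k => getE E i k && getE E (k + 1) j)

-- the inner loop `for j in range(i, n)` filling row i (E[i][j] = … is a List.set)
def rowE (cs : List Char) (n : Nat) (E : List (List Bool)) (i : Nat) : List (List Bool) :=
  (List.range' i (n - i)).foldl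
    (fun E j => E.set i ((E.getD i []).set j (cellB cs E i j))) E

-- the outer loop `for i in range(n-1, -1, -1)`
def buildE (cs : List Char) (n : Nat) : List (List Bool) :=
  (List.range n).foldl (fun E ii => rowE cs n E (n - 1 - ii))
    (List.replicate n (List.replicate n false))

-- the body computing cur = best[i] (best is a List String, initially (n+1) copies of "")
def bestRow (cs : List Char) (n : Nat) (E : List (List Bool))
    (best : List String) (i : Nat) : String :=
  (rangeStep2 (i + 1) n).foldl
    (fun cur j =>
      if getE E i j then
        (if best.getD (j + 1) "" < cur then best.getD (j + 1) "" else cur)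
      else cur)
    (String.ofList (cs.getD i ' ' :: (best.getD (i + 1) "").toList))

def buildBest (cs : List Char) (n : Nat) (E : List (List Bool)) : List String :=
  (List.range n).foldl
    (fun best ii => best.set (n - 1 - ii) (bestRow cs n E best (n - 1 - ii)))
    (List.replicate (n + 1) "")

def lexicographicallySmallestString_alt (s : String) : String :=
  (buildBest s.toList s.toList.length (buildE s.toList s.toList.length)).getD 0 ""

-- ===== PRECONDITION & SPEC =====
def Spec_lexicographicallySmallestString (s : String) (out : String) : Prop := out = lexicographicallySmallestString_alt s
instance (s : String) (out : String) : Decidable (Spec_lexicographicallySmallestString s out) := by unfold Spec_lexicographicallySmallestString; infer_instance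

-- ===== CLAIM (what is proved, stated in full; the proofs are below) =====
def Claim_equal_lexicographicallySmallestString : Prop := ∀ (s : String), Dom_lexicographicallySmallestString s → Spec_lexicographicallySmallestString s (lexicographicallySmallestString s)

-- ===== LEMMAS AND PROOFS =====

theorem adjacentCh_self (c : Char) : adjacentCh c c = false := by
  simp [adjacentCh]

theorem emptyA_gt {cs : List Char} {i j : Nat} (h : i > j) : emptyA cs i j = true := by
  rw [emptyA]; simp [h]

theorem emptyA_le {cs : List Char} {i j : Nat} (h : ¬ i > j) :
    emptyA cs i j =
      ((adjacentCh (cs.getD i ' ') (cs.getD j ' ') && emptyA cs (i + 1) (j - 1))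
        || (rangeStep2 (i + 1) (j - 1)).any (fun k => emptyA cs i k && emptyA cs (k + 1) j)) := by
  rw [emptyA]
  rw [dif_neg h]
  congr 1
  conv_rhs => rw [← List.attach_map_subtype_val (rangeStep2 (i + 1) (j - 1)), List.any_map]
  rfl

-- shape of the 2D table: n rows of length n
def GoodE (n : Nat) (E : List (List Bool)) : Prop :=
  E.length = n ∧ ∀ r ∈ E, r.length = n

theorem getD_set_self {α : Type} (l : List α) (i : Nat) (v d : α) (h : i < l.length) :
    (l.set i v).getD i d = v := by
  simp [List.getD_eq_getElem?_getD, h]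

theorem getD_set_ne {α : Type} (l : List α) (a i : Nat) (v d : α) (h : a ≠ i) :
    (l.set i v).getD a d = l.getD a d := by
  simp [List.getD_eq_getElem?_getD, List.getElem?_set_ne (Ne.symm h)]

theorem goodE_set {n : Nat} {E : List (List Bool)} (hE : GoodE n E) (i j : Nat) (v : Bool) :
    GoodE n (E.set i ((E.getD i []).set j v)) := by
  by_cases hi : i < E.length
  · obtain ⟨h1, h2⟩ := hE
    refine ⟨by simp [h1], ?_⟩
    intro r hr
    rcases List.mem_or_eq_of_mem_set hr with h | rfl
    · exact h2 r h
    · rw [List.length_set, List.getD_eq_getElem?_getD, List.getElem?_eq_getElem hi]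
      exact h2 _ (List.getElem_mem hi)
  · rw [List.set_eq_of_length_le (by omega)]
    exact hE

theorem getE_set_self {n : Nat} {E : List (List Bool)} (hE : GoodE n E) {i j : Nat}
    (hi : i < n) (hj : j < n) (v : Bool) :
    getE (E.set i ((E.getD i []).set j v)) i j = v := by
  obtain ⟨h1, h2⟩ := hE
  have hrow : (E.getD i []).length = n := by
    rw [List.getD_eq_getElem?_getD, List.getElem?_eq_getElem (by omega)]
    exact h2 _ (List.getElem_mem (by omega))
  unfold getE
  rw [getD_set_self _ _ _ _ (by omega), getD_set_self _ _ _ _ (by omega)]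

theorem getE_set_other {E : List (List Bool)} {a b i j : Nat}
    (h : ¬ (a = i ∧ b = j)) (v : Bool) :
    getE (E.set i ((E.getD i []).set j v)) a b = getE E a b := by
  unfold getE
  by_cases ha : a = i
  · subst ha
    have hb : b ≠ j := fun hb => h ⟨rfl, hb⟩
    by_cases hi : a < E.length
    · rw [getD_set_self _ _ _ _ hi, getD_set_ne _ _ _ _ _ hb]
    · rw [List.set_eq_of_length_le (by omega)]
  · rw [getD_set_ne _ _ _ _ _ ha]

-- cells of the table that are already filled (rows below i, plus row i left of j)
def FilledE (n i j a b : Nat) : Prop :=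
  (i < a ∧ a ≤ b ∧ b < n) ∨ (a = i ∧ a ≤ b ∧ b < j)

theorem cellB_correct (cs : List Char) (n : Nat) (E : List (List Bool)) (i j : Nat)
    (hij : i ≤ j) (hjn : j < n)
    (hE : ∀ a b : Nat, FilledE n i j a b → getE E a b = emptyA cs a b) :
    cellB cs E i j = emptyA cs i j := by
  rw [emptyA_le (by omega), cellB]
  congr 1
  · by_cases hadj : adjacentCh (cs.getD i ' ') (cs.getD j ' ') = true
    · have hne : i ≠ j := by
        rintro rfl
        rw [adjacentCh_self] at hadj
        exact Bool.false_ne_true hadj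
      by_cases hj1 : j = i + 1
      · subst hj1
        rw [hadj, emptyA_gt (by omega)]
        simp
      · have hEv : getE E (i + 1) (j - 1) = emptyA cs (i + 1) (j - 1) :=
          hE (i + 1) (j - 1) (Or.inl ⟨by omega, by omega, by omega⟩)
        rw [hEv]
        simp [hj1]
    · rw [Bool.not_eq_true] at hadj
      rw [hadj]
      simp
  · apply PySem.List.any_congr_mem
    intro k hk
    have hb := mem_rangeStep2 hk
    rw [hE i k (Or.inr ⟨rfl, by omega, by omega⟩),
        hE (k + 1) j (Or.inl ⟨by omega, by omega, hjn⟩)]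

theorem rowE_inv (cs : List Char) (n i : Nat) :
    ∀ (m j0 : Nat) (E : List (List Bool)), i ≤ j0 → j0 + m ≤ n → i < n → GoodE n E →
      (∀ a b, FilledE n i j0 a b → getE E a b = emptyA cs a b) →
      GoodE n ((List.range' j0 m).foldl
          (fun E j => E.set i ((E.getD i []).set j (cellB cs E i j))) E) ∧
      ∀ a b, FilledE n i (j0 + m) a b →
        getE ((List.range' j0 m).foldl
          (fun E j => E.set i ((E.getD i []).set j (cellB cs E i j))) E) a b
          = emptyA cs a b := by
  intro m
  induction m with
  | zero =>
      intro j0 E h1 h2 hin hG hE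
      exact ⟨hG, fun a b hab => hE a b hab⟩
  | succ m ih =>
      intro j0 E h1 h2 hin hG hE
      rw [List.range'_succ]
      simp only [List.foldl_cons]
      have hstep : ∀ a b, FilledE n i (j0 + 1) a b →
          getE (E.set i ((E.getD i []).set j0 (cellB cs E i j0))) a b = emptyA cs a b := by
        intro a' b' hab'
        by_cases hc : a' = i ∧ b' = j0
        · obtain ⟨rfl, rfl⟩ := hc
          rw [getE_set_self hG hin (by omega)]
          exact cellB_correct cs n E a' b' h1 (by omega) hE
        · rw [getE_set_other hc]
          exact hE a' b' (by unfold FilledE at hab' ⊢; omega)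
      obtain ⟨hG', hout⟩ := ih (j0 + 1) _ (by omega) (by omega) hin (goodE_set hG i j0 _) hstep
      exact ⟨hG', fun a b hab => hout a b (by unfold FilledE at hab ⊢; omega)⟩

theorem buildE_inv (cs : List Char) (n : Nat) :
    ∀ m, m ≤ n →
      GoodE n ((List.range m).foldl (fun E ii => rowE cs n E (n - 1 - ii))
        (List.replicate n (List.replicate n false))) ∧
      ∀ a b, n - m ≤ a → a ≤ b → b < n →
        getE ((List.range m).foldl (fun E ii => rowE cs n E (n - 1 - ii))
          (List.replicate n (List.replicate n false))) a b
          = emptyA cs a b := by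
  intro m
  induction m with
  | zero =>
      refine fun hm => ⟨⟨by simp, ?_⟩, fun a b ha hab hb => by omega⟩
      intro r hr
      rw [List.eq_of_mem_replicate hr]
      simp
  | succ m ih =>
      intro hm
      obtain ⟨hG, hprev⟩ := ih (by omega)
      rw [List.range_succ, List.foldl_append]
      simp only [List.foldl_cons, List.foldl_nil]
      unfold rowE
      have hni : n - 1 - m + (n - (n - 1 - m)) = n := by omega
      obtain ⟨hG', hout⟩ := rowE_inv cs n (n - 1 - m) (n - (n - 1 - m)) (n - 1 - m) _
        le_rfl (by omega) (by omega) hG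
        (by
          intro a' b' hab'
          unfold FilledE at hab'
          exact hprev a' b' (by omega) (by omega) (by omega))
      refine ⟨hG', fun a b ha hab hb => hout a b ?_⟩
      rw [hni]
      unfold FilledE
      omega

theorem buildE_correct (cs : List Char) (n a b : Nat) (hab : a ≤ b) (hb : b < n) :
    getE (buildE cs n) a b = emptyA cs a b := by
  unfold buildE
  exact (buildE_inv cs n n le_rfl).2 a b (by omega) hab hb

theorem dfsA_ge {cs : List Char} {n i : Nat} (h : n ≤ i) : dfsA cs n i = "" := by
  rw [dfsA]; simp [h]

theorem min_if (a b : String) :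
    (if b < a then b else a) = (if a ≤ b then a else b) := by
  by_cases h : a ≤ b
  · rw [if_pos h, if_neg (not_lt.2 h)]
  · rw [if_pos (lt_of_not_ge h), if_neg h]

theorem bestRow_correct (cs : List Char) (n : Nat) (E : List (List Bool))
    (best : List String) (i : Nat) (hi : i < n)
    (hE : ∀ a b, a ≤ b → b < n → getE E a b = emptyA cs a b)
    (hbest : ∀ a, i + 1 ≤ a → best.getD a "" = dfsA cs n a) :
    bestRow cs n E best i = dfsA cs n i := by
  rw [dfsA, dif_neg (by omega), bestRow]
  have hA : (rangeStep2 (i + 1) n).attach.foldl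
      (fun dummy j =>
        if emptyA cs i j.1 then
          (if dummy ≤ dfsA cs n (j.1 + 1) then dummy else dfsA cs n (j.1 + 1))
        else dummy)
      (String.ofList (cs.getD i ' ' :: (dfsA cs n (i + 1)).toList))
      = (rangeStep2 (i + 1) n).foldl
      (fun dummy j =>
        if emptyA cs i j then
          (if dummy ≤ dfsA cs n (j + 1) then dummy else dfsA cs n (j + 1))
        else dummy)
      (String.ofList (cs.getD i ' ' :: (dfsA cs n (i + 1)).toList)) :=
    List.foldl_attach (l := rangeStep2 (i + 1) n)
      (f := fun dummy j =>
        if emptyA cs i j then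
          (if dummy ≤ dfsA cs n (j + 1) then dummy else dfsA cs n (j + 1))
        else dummy)
      (b := String.ofList (cs.getD i ' ' :: (dfsA cs n (i + 1)).toList))
  rw [hA, hbest (i + 1) le_rfl]
  apply PySem.List.foldl_congr_mem
  intro cur j hj
  have hb := mem_rangeStep2 hj
  rw [hE i j (by omega) (by omega), hbest (j + 1) (by omega)]
  by_cases he : emptyA cs i j = true
  · rw [he]
    simp only [if_true]
    exact min_if cur (dfsA cs n (j + 1))
  · rw [Bool.not_eq_true] at he
    rw [he]
    simp

theorem getD_replicate_empty (k a : Nat) : (List.replicate k "").getD a "" = "" := by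
  rw [List.getD_eq_getElem?_getD, List.getElem?_replicate]
  split <;> rfl

theorem buildBest_inv (cs : List Char) (n : Nat) (E : List (List Bool))
    (hE : ∀ a b, a ≤ b → b < n → getE E a b = emptyA cs a b) :
    ∀ m, m ≤ n →
      ((List.range m).foldl
        (fun best ii => best.set (n - 1 - ii) (bestRow cs n E best (n - 1 - ii)))
        (List.replicate (n + 1) "")).length = n + 1 ∧
      ∀ a, n - m ≤ a →
        ((List.range m).foldl
          (fun best ii => best.set (n - 1 - ii) (bestRow cs n E best (n - 1 - ii)))
          (List.replicate (n + 1) "")).getD a ""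
          = dfsA cs n a := by
  intro m
  induction m with
  | zero =>
      refine fun hm => ⟨by simp, fun a ha => ?_⟩
      simp only [List.range_zero, List.foldl_nil]
      rw [getD_replicate_empty, dfsA_ge (by omega)]
  | succ m ih =>
      intro hm
      obtain ⟨hlen, hprev⟩ := ih (by omega)
      rw [List.range_succ, List.foldl_append]
      simp only [List.foldl_cons, List.foldl_nil]
      refine ⟨by rw [List.length_set, hlen], ?_⟩
      intro a ha
      by_cases hc : a = n - 1 - m
      · subst hc
        rw [getD_set_self _ _ _ _ (by omega)]
        exact bestRow_correct cs n E _ (n - 1 - m) (by omega) hE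
          (fun a' ha' => hprev a' (by omega))
      · rw [getD_set_ne _ _ _ _ _ hc]
        exact hprev a (by omega)

-- ===== VERDICT (by name: the statement is the Claim_ definition above) =====
theorem lexicographicallySmallestString_spec : Claim_equal_lexicographicallySmallestString := by
  intro s _
  unfold Spec_lexicographicallySmallestString lexicographicallySmallestString
    lexicographicallySmallestString_alt
  unfold buildBest
  exact ((buildBest_inv s.toList s.toList.length (buildE s.toList s.toList.length)
    (fun a b hab hb => buildE_correct s.toList s.toList.length a b hab hb)
    s.toList.length le_rfl).2 0 (by omega)).symm
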